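-- pv_equiv track=rewrite | github.com/MateDominguez/CS | Algo1/guia8.py | eliminar_espacios_iniciales
-- ===== SOURCE A (Python) =====
-- def eliminar_espacios_iniciales (texto: str) -> list[str]:
--   texto_sin_espacios: list[str] = []
--   es_espacio: bool = True
--   for caracter in texto:
--     if caracter != ' ' and es_espacio == True:
--       es_espacio = False
--     if es_espacio == False:
--       texto_sin_espacios.append(caracter)
--   return texto_sin_espacios
-- ===== SOURCE B (Python) =====
-- def eliminar_espacios_iniciales(texto: str) -> list[str]:
--     i = 0
--     while i < len(texto) and texto[i] == ' ':
--         i += 1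
--     return list(texto[i:])
-- ===== Notes on version B (the rewrite author's own statement) =====
-- stated objective: simpler
-- what changed: Replaces A's per-character flag-and-append loop with a two-phase structure: find the first non-space index with a while loop, then bulk-copy the tail with one slice (the bulk slice avoids per-character interpreted appends).
import Mathlib
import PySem

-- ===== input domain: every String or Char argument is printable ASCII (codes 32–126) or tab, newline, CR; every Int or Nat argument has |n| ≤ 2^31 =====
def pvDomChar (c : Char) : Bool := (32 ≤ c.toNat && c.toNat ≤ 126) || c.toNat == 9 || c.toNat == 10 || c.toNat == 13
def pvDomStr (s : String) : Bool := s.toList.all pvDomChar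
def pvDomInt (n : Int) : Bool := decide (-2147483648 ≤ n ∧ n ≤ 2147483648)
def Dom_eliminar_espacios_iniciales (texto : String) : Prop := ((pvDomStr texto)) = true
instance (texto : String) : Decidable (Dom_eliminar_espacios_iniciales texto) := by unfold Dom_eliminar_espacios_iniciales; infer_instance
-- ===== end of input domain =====

-- B replaces A's per-character flag-and-append loop with "find the first non-space index, then copy the tail in one slice" (simpler decomposition, same cost).

-- ===== PORT A =====
-- one step of A's for-loop body: state is (es_espacio, texto_sin_espacios)
def pvStepA (st : Bool × List String) (caracter : Char) : Bool × List String :=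
  let es_espacio := if caracter ≠ ' ' ∧ st.1 = true then false else st.1
  let acc := if es_espacio = false then st.2 ++ [String.ofList [caracter]] else st.2
  (es_espacio, acc)

def eliminar_espacios_iniciales (texto : String) : List String :=
  (texto.toList.foldl pvStepA (true, [])).2

-- ===== PORT B =====
-- the while loop of B: i advances while texto[i] == ' '
def pvSkipSpaces : List Char → Nat
  | [] => 0
  | c :: cs => if c = ' ' then pvSkipSpaces cs + 1 else 0

def eliminar_espacios_iniciales_alt (texto : String) : List String :=
  (texto.toList.drop (pvSkipSpaces texto.toList)).map (fun c => String.ofList [c])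

-- ===== PRECONDITION & SPEC =====
def Spec_eliminar_espacios_iniciales (texto : String) (out : List String) : Prop := out = eliminar_espacios_iniciales_alt texto
instance (texto : String) (out : List String) : Decidable (Spec_eliminar_espacios_iniciales texto out) := by unfold Spec_eliminar_espacios_iniciales; infer_instance

-- ===== CLAIM (what is proved, stated in full; the proofs are below) =====
def Claim_equal_eliminar_espacios_iniciales : Prop := ∀ (texto : String), Dom_eliminar_espacios_iniciales texto → Spec_eliminar_espacios_iniciales texto (eliminar_espacios_iniciales texto)

-- ===== LEMMAS AND PROOFS =====
-- once the flag is false, A's loop appends every remaining character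
theorem pv_foldl_false (cs : List Char) (acc : List String) :
    cs.foldl pvStepA (false, acc) = (false, acc ++ cs.map (fun c => String.ofList [c])) := by
  induction cs generalizing acc with
  | nil => simp
  | cons c cs ih => simp [pvStepA, ih]

-- while the flag is true, A's loop skips leading spaces and then appends the rest
theorem pv_foldl_true (cs : List Char) (acc : List String) :
    cs.foldl pvStepA (true, acc)
      = ((cs.drop (pvSkipSpaces cs)).isEmpty,
         acc ++ (cs.drop (pvSkipSpaces cs)).map (fun c => String.ofList [c])) := by
  induction cs generalizing acc with
  | nil => simp [pvSkipSpaces]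
  | cons c cs ih =>
    by_cases h : c = ' '
    · subst h
      simp [List.foldl, pvStepA, pvSkipSpaces, ih]
    · simp [List.foldl, pvStepA, h, pvSkipSpaces, pv_foldl_false, List.isEmpty]

-- ===== VERDICT (by name: the statement is the Claim_ definition above) =====
theorem eliminar_espacios_iniciales_spec : Claim_equal_eliminar_espacios_iniciales := by
  intro texto _
  show _ = _
  simp [eliminar_espacios_iniciales, eliminar_espacios_iniciales_alt, pv_foldl_true]
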